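-- pv_equiv track=rewrite | github.com/janjunjon/master-core | src/ML/Other/HeavyRainCases.py | getIndexes
-- ===== SOURCE A (Python) =====
-- def getIndexes(LAT, LON):
--     count = 0
--     indexes = []
--     for lat in range(253):
--         for lon in range(241):
--             if lat in LAT and lon in LON:
--                 indexes.append(count)
--             count += 1
--     return indexes
-- ===== SOURCE B (Python) =====
-- def getIndexes(LAT, LON):
--     lats = sorted({l for l in LAT if 0 <= l < 253})
--     lons = sorted({l for l in LON if 0 <= l < 241})
--     return [lat * 241 + lon for lat in lats for lon in lons]
-- ===== Notes on version B (the rewrite author's own statement) =====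
-- stated objective: faster
-- what changed: Instead of scanning all 253*241 grid cells with a membership test per cell, B sorts the deduplicated range-filtered LAT and LON values and emits lat*241+lon directly for each pair.
import Mathlib
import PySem

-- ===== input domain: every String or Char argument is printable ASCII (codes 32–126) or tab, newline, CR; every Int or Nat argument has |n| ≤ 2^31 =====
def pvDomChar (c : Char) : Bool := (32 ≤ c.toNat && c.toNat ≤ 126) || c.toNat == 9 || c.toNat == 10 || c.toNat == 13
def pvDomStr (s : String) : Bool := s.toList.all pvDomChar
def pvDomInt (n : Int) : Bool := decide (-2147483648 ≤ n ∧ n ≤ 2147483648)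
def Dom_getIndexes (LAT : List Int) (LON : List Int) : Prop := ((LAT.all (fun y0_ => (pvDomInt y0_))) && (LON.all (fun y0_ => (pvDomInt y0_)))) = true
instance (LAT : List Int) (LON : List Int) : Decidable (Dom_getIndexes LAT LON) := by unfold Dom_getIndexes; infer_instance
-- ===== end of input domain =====

-- B replaces A's full 253×241 grid scan (membership test per cell) by iterating only the
-- sorted deduplicated range-filtered LAT/LON values and emitting lat*241+lon directly.

-- ===== PORT A =====
def getIndexes (LAT : List Int) (LON : List Int) : List Int :=
  ((PySem.List.pyRange 0 253 1).foldl (fun (st : Int × List Int) lat =>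
    (PySem.List.pyRange 0 241 1).foldl (fun (st : Int × List Int) lon =>
      (st.1 + 1, if lat ∈ LAT ∧ lon ∈ LON then st.2 ++ [st.1] else st.2)) st)
    ((0 : Int), ([] : List Int))).2

-- ===== PORT B =====
def getIndexes_alt (LAT : List Int) (LON : List Int) : List Int :=
  let lats := PySem.List.sorted (PySem.Set.ofList (LAT.filter (fun l => decide (0 ≤ l ∧ l < 253)))) (fun x => x) false
  let lons := PySem.List.sorted (PySem.Set.ofList (LON.filter (fun l => decide (0 ≤ l ∧ l < 241)))) (fun x => x) false
  lats.flatMap (fun lat => lons.map (fun lon => lat * 241 + lon))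

-- ===== PRECONDITION & SPEC =====
def Spec_getIndexes (LAT : List Int) (LON : List Int) (out : List Int) : Prop := out = getIndexes_alt LAT LON
instance (LAT : List Int) (LON : List Int) (out : List Int) : Decidable (Spec_getIndexes LAT LON out) := by unfold Spec_getIndexes; infer_instance

-- ===== CLAIM (what is proved, stated in full; the proofs are below) =====
def Claim_equal_getIndexes : Prop := ∀ (LAT : List Int) (LON : List Int), Dom_getIndexes LAT LON → Spec_getIndexes LAT LON (getIndexes LAT LON)

-- ===== LEMMAS AND PROOFS =====

-- sorted(set([l for l in xs if 0 <= l < n])) is exactly range(n) filtered by membership in xs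
lemma sortedSet_filter_eq (xs : List Int) (n : Int) :
    PySem.List.sorted (PySem.Set.ofList (xs.filter (fun l => decide (0 ≤ l ∧ l < n)))) (fun x => x) false
      = (PySem.List.pyRange 0 n 1).filter (fun x => decide (x ∈ xs)) := by
  apply PySem.List.sorted_eq_of_perm_of_pairwise_lt
  · rw [List.perm_ext_iff_of_nodup]
    · intro a
      simp [PySem.List.mem_pyRange_one, PySem.Set.mem_ofList, List.mem_filter, and_comm]
    · exact (PySem.List.nodup_pyRange_one 0 n).filter _
    · exact PySem.Set.nodup_ofList _
  · exact (PySem.List.pairwise_lt_pyRange_one 0 n).filter _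

-- A's inner loop: fold over range(0,n) with running counter c, appending the counter under P
lemma innerLoop (P : Int → Prop) [DecidablePred P] (n : Nat) (c : Int) (acc : List Int) :
    (PySem.List.pyRange 0 n 1).foldl
        (fun (st : Int × List Int) lon => (st.1 + 1, if P lon then st.2 ++ [st.1] else st.2)) (c, acc)
      = (c + n, acc ++ ((PySem.List.pyRange 0 n 1).filter (fun lon => decide (P lon))).map (fun lon => c + lon)) := by
  induction n generalizing acc with
  | zero => simp [PySem.List.pyRange_one_eq_nil]
  | succ m ih =>
    have h : ((m : Int) + 1) = ((m + 1 : Nat) : Int) := by push_cast; ring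
    rw [← h, PySem.List.pyRange_one_succ_right (by positivity), List.foldl_append, ih,
        List.filter_append, List.map_append]
    by_cases hP : P (m : Int) <;> simp [hP] <;> omega

-- A's outer loop, with n = 241 columns per row
lemma outerLoop (LAT LON : List Int) (m : Nat) (c : Int) (acc : List Int) :
    (PySem.List.pyRange 0 m 1).foldl
        (fun (st : Int × List Int) lat =>
          (PySem.List.pyRange 0 241 1).foldl
            (fun (st : Int × List Int) lon => (st.1 + 1, if lat ∈ LAT ∧ lon ∈ LON then st.2 ++ [st.1] else st.2)) st) (c, acc)
      = (c + 241 * m,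
         acc ++ ((PySem.List.pyRange 0 m 1).filter (fun lat => decide (lat ∈ LAT))).flatMap
            (fun lat => ((PySem.List.pyRange 0 241 1).filter (fun lon => decide (lon ∈ LON))).map
              (fun lon => c + 241 * lat + lon))) := by
  induction m generalizing acc with
  | zero => simp [PySem.List.pyRange_one_eq_nil]
  | succ k ih =>
    have h : ((k : Int) + 1) = ((k + 1 : Nat) : Int) := by push_cast; ring
    rw [← h, PySem.List.pyRange_one_succ_right (by positivity), List.foldl_append, ih,
        List.filter_append, List.flatMap_append]
    simp only [List.foldl_cons, List.foldl_nil]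
    rw [show (241 : Int) = ((241 : Nat) : Int) from rfl, innerLoop (fun lon => (k : Int) ∈ LAT ∧ lon ∈ LON)]
    by_cases hk : (k : Int) ∈ LAT
    · simp only [hk, true_and, Prod.mk.injEq]
      refine ⟨by push_cast; ring, ?_⟩
      simp [hk, List.append_assoc]
    · have hnil : (PySem.List.pyRange 0 ((241:Nat):Int) 1).filter (fun lon => decide ((k : Int) ∈ LAT ∧ lon ∈ LON)) = [] := by
        apply List.filter_eq_nil_iff.mpr
        intro a _; simp [hk]
      simp only [hnil, Prod.mk.injEq, List.map_nil, List.append_nil]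
      refine ⟨by push_cast; ring, ?_⟩
      simp [hk]

-- ===== VERDICT (by name: the statement is the Claim_ definition above) =====
theorem getIndexes_spec : Claim_equal_getIndexes := by
  intro LAT LON _
  unfold Spec_getIndexes getIndexes getIndexes_alt
  rw [show (253 : Int) = ((253 : Nat) : Int) from rfl, outerLoop]
  simp only [sortedSet_filter_eq, zero_add]
  apply List.flatMap_congr
  intro x _
  apply List.map_congr_left
  intro y _
  ring
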